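-- pv_equiv track=rewrite | github.com/im-grahammartin/analytics-aggregator | src/helpers/aggregator.py | aggregate_reports
-- ===== SOURCE A (Python) =====
-- def aggregate_reports(data):
--     aggregate = {}
--
--     for row in data:
--         for result in row['results']:
--             for key in result:
--                 if(key in aggregate):
--                     aggregate[key] += result[key]
--                 else:
--                     aggregate[key] = result[key]
--
--     return aggregate
-- ===== SOURCE B (Python) =====
-- def aggregate_reports(data):
--     # Stage 1: flatten every report into one stream of (key, value) pairs.
--     pairs = [(k, v)
--              for row in data
--              for result in row['results']
--              for k, v in result.items()]
--     # Stage 2: the distinct keys, in order of first appearance.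
--     keys = []
--     seen = set()
--     for k, _ in pairs:
--         if k not in seen:
--             seen.add(k)
--             keys.append(k)
--     # Stage 3: per-key scan — for each key sum all of its values in one sweep.
--     return {k: sum(v for kk, v in pairs if kk == k) for k in keys}
-- ===== Notes on version B (the rewrite author's own statement) =====
-- stated objective: alternative
-- what changed: B replaces A's streaming dict accumulation (membership test + in-place add per pair) by a three-stage group-by: flatten all reports into one pair stream, compute the distinct keys in first-appearance order, then for each key do a separate scan summing its values — no accumulator dict at all.
import Mathlib
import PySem

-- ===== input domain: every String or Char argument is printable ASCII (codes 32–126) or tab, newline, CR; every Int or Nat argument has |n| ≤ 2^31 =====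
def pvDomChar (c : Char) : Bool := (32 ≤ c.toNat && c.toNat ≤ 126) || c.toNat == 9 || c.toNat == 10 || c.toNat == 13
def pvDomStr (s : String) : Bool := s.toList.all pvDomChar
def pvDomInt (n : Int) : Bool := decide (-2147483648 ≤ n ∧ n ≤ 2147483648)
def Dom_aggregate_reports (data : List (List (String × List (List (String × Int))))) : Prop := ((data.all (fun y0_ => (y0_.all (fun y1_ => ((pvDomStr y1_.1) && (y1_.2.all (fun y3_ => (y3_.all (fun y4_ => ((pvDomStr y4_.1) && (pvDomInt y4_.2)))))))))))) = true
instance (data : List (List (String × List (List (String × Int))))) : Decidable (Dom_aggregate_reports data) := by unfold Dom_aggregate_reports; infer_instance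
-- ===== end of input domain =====

-- B groups per key — flatten to one pair stream, list the distinct keys in first-appearance
-- order, then sum each key's values in its own scan (no accumulator dict); objective: alternative.


-- ===== PORT A =====
-- row['results'] is ported as get? … |>.getD []; Pre_ guarantees the key is present, so the
-- default is never taken on admitted inputs (Python raises KeyError exactly where get? = none).
-- result[key] is ported as getD key 0: key ranges over the dict's own keys, so it is present.
def aggregate_reports (data : List (List (String × List (List (String × Int))))) : List (String × Int) :=
  (data.foldl (fun aggregate row =>
      (((PySem.Dict.ofList row).get? "results").getD []).foldl (fun aggregate result =>
        ((PySem.Dict.ofList result).keys).foldl (fun aggregate key =>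
          if aggregate.contains key then
            aggregate.insert key (aggregate.getD key 0 + (PySem.Dict.ofList result).getD key 0)
          else
            aggregate.insert key ((PySem.Dict.ofList result).getD key 0))
          aggregate)
        aggregate)
    (PySem.Dict.empty : PySem.Dict String Int)).items

-- ===== PORT B =====
-- Stage 1: pairs; stage 2: distinct keys (seen-set + list, first appearances);
-- stage 3: one summing scan of the pair stream per key.
def pvPairsB (data : List (List (String × List (List (String × Int))))) : List (String × Int) :=
  data.flatMap (fun row =>
    (((PySem.Dict.ofList row).get? "results").getD []).flatMap (fun result =>
      (PySem.Dict.ofList result).items))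

def pvKeysB (pairs : List (String × Int)) : List String :=
  (pairs.foldl (fun (st : PySem.Set String × List String) p =>
      if PySem.Set.contains st.1 p.1 = false then
        (PySem.Set.add st.1 p.1, st.2 ++ [p.1])
      else st)
    ((PySem.Set.empty : PySem.Set String), [])).2

def aggregate_reports_alt (data : List (List (String × List (List (String × Int))))) : List (String × Int) :=
  (pvKeysB (pvPairsB data)).map (fun k =>
    (k, (((pvPairsB data).filter (fun p => p.1 == k)).map Prod.snd).sum))

-- ===== PRECONDITION & SPEC =====
-- Pre_ excludes exactly the rows without a "results" key, on which Python A raises KeyError.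
def Pre_aggregate_reports (data : List (List (String × List (List (String × Int))))) : Prop :=
  ∀ row ∈ data, "results" ∈ row.map Prod.fst
instance (data : List (List (String × List (List (String × Int))))) : Decidable (Pre_aggregate_reports data) := by unfold Pre_aggregate_reports; infer_instance
def pvWitness_aggregate_reports : (List (List (String × List (List (String × Int))))) :=
  [[("results", [[("a", 1), ("b", 2)], [("a", 3)]])]]
def Spec_aggregate_reports (data : List (List (String × List (List (String × Int))))) (out : List (String × Int)) : Prop := out = aggregate_reports_alt data
instance (data : List (List (String × List (List (String × Int))))) (out : List (String × Int)) : Decidable (Spec_aggregate_reports data out) := by unfold Spec_aggregate_reports; infer_instance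

-- ===== CLAIM (what is proved, stated in full; the proofs are below) =====
def Claim_equal_aggregate_reports : Prop := ∀ (data : List (List (String × List (List (String × Int))))), Dom_aggregate_reports data → Pre_aggregate_reports data → Spec_aggregate_reports data (aggregate_reports data)

-- ===== LEMMAS AND PROOFS =====

-- A's if/else update is exactly an unconditional insert of (old getD 0) + v.
theorem step_eq (agg : PySem.Dict String Int) (key : String) (v : Int) :
    (if agg.contains key then agg.insert key (agg.getD key 0 + v) else agg.insert key v)
      = agg.insert key (agg.getD key 0 + v) := by
  by_cases h : agg.contains key = true
  · simp [h]
  · simp only [Bool.not_eq_true] at h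
    simp [h, PySem.Dict.getD_of_not_contains agg 0 h]

-- folding over a flatMap is the nested fold
theorem foldl_flatMap {α β γ : Type} (l : List α) (g : α → List β) (f : γ → β → γ) (init : γ) :
    (l.flatMap g).foldl f init = l.foldl (fun acc x => (g x).foldl f acc) init := by
  induction l generalizing init with
  | nil => rfl
  | cons x t ih => simp [List.flatMap_cons, List.foldl_append, ih]

-- A's inner loop over a result's keys equals the fold of its items.
theorem inner_eq (result : List (String × Int)) (agg : PySem.Dict String Int) :
    ((PySem.Dict.ofList result).keys).foldl (fun aggregate key =>
        if aggregate.contains key then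
          aggregate.insert key (aggregate.getD key 0 + (PySem.Dict.ofList result).getD key 0)
        else
          aggregate.insert key ((PySem.Dict.ofList result).getD key 0))
      agg
    = ((PySem.Dict.ofList result).items).foldl
        (fun aggregate p => aggregate.insert p.1 (aggregate.getD p.1 0 + p.2)) agg := by
  rw [PySem.Dict.items_eq_map_keys (PySem.Dict.ofList result) (PySem.Dict.nodup_keys_ofList result) 0]
  rw [List.foldl_map]
  exact PySem.List.foldl_congr_mem _ _ _ _ (fun acc key _ => step_eq acc key _)

-- A as a single fold over the flattened pair stream
theorem a_flat (data : List (List (String × List (List (String × Int))))) :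
    aggregate_reports data
      = ((pvPairsB data).foldl
          (fun aggregate p => aggregate.insert p.1 (aggregate.getD p.1 0 + p.2))
          (PySem.Dict.empty : PySem.Dict String Int)).items := by
  unfold aggregate_reports pvPairsB
  rw [foldl_flatMap]
  refine congrArg PySem.Dict.items ?_
  refine PySem.List.foldl_congr_mem _ _ _ _ ?_
  intro acc row _
  rw [foldl_flatMap]
  exact PySem.List.foldl_congr_mem _ _ _ _ (fun acc result _ => inner_eq result acc)

-- the value the accumulating fold stores at k is the sum of k's values in the stream
theorem getD_fold (l : List (String × Int)) (d : PySem.Dict String Int) (k : String) :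
    (l.foldl (fun aggregate p => aggregate.insert p.1 (aggregate.getD p.1 0 + p.2)) d).getD k 0
      = d.getD k 0 + ((l.filter (fun p => p.1 == k)).map Prod.snd).sum := by
  induction l generalizing d with
  | nil => simp
  | cons p t ih =>
    simp only [List.foldl_cons, ih, List.filter_cons]
    by_cases h : p.1 = k
    · subst h
      simp
      ring
    · simp [PySem.Dict.getD_insert, Ne.symm h, (by simpa using h : (p.1 == k) = false)]

-- the seen-set/keys-list fold computes the ordered-dedup of the key stream
theorem bkeys_fold (l : List (String × Int)) (s : List String) :
    (l.foldl (fun (st : PySem.Set String × List String) p =>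
        if PySem.Set.contains st.1 p.1 = false then
          (PySem.Set.add st.1 p.1, st.2 ++ [p.1])
        else st) (s, s)).2
      = (l.map Prod.fst).foldl PySem.Set.add s := by
  induction l generalizing s with
  | nil => rfl
  | cons p t ih =>
    simp only [List.foldl_cons, List.map_cons]
    by_cases h : PySem.Set.contains s p.1 = false
    · have hmem : p.1 ∉ s := by simpa [PySem.Set.contains] using h
      have hadd : PySem.Set.add s p.1 = s ++ [p.1] := by simp [PySem.Set.add, hmem]
      rw [if_pos h, ← hadd]
      exact ih _
    · have hmem : p.1 ∈ s := by
        have hc : PySem.Set.contains s p.1 = true := by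
          cases hh : PySem.Set.contains s p.1 <;> simp_all
        simpa [PySem.Set.contains] using hc
      have hadd : PySem.Set.add s p.1 = s := by simp [PySem.Set.add, hmem]
      rw [if_neg h, hadd]
      exact ih s

-- B's stage 2 is ordered dedup of the key stream
theorem keysB_eq (pairs : List (String × Int)) :
    pvKeysB pairs = PySem.Set.ofList (pairs.map Prod.fst) := by
  unfold pvKeysB
  have he : ((PySem.Set.empty : PySem.Set String), ([] : List String))
      = (([] : List String), ([] : List String)) := rfl
  rw [he, bkeys_fold, ← PySem.Set.ofList_eq_foldl]

-- ===== VERDICT (by name: the statement is the Claim_ definition above) =====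
theorem aggregate_reports_spec : Claim_equal_aggregate_reports := by
  intro data _ _
  unfold Spec_aggregate_reports aggregate_reports_alt
  rw [a_flat]
  have hkeys :
      ((pvPairsB data).foldl (fun aggregate p => aggregate.insert p.1 (aggregate.getD p.1 0 + p.2))
        (PySem.Dict.empty : PySem.Dict String Int)).keys
        = PySem.Set.ofList ((pvPairsB data).map Prod.fst) := by
    rw [PySem.Dict.keys_foldl_insert_key]
    simp [PySem.Dict.keys_empty, PySem.Set.update, PySem.Set.ofList_eq_foldl]
  have hnodup :
      ((pvPairsB data).foldl (fun aggregate p => aggregate.insert p.1 (aggregate.getD p.1 0 + p.2))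
        (PySem.Dict.empty : PySem.Dict String Int)).keys.Nodup := by
    rw [hkeys]; exact PySem.Set.nodup_ofList _
  rw [PySem.Dict.items_eq_map_keys _ hnodup 0, hkeys, keysB_eq]
  refine List.map_congr_left ?_
  intro k _
  rw [getD_fold]
  simp [PySem.Dict.getD_empty]
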